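-- pv_equiv track=rewrite | github.com/IsolatedRain/code_wars | completed/Basic Nico variation.py | nico
-- ===== SOURCE A (Python) =====
-- import itertools
--
-- def nico(k, msg):
--     n = len(k)
--     msg = msg + " " * (n - len(msg))
--     d = {c: i for i, c in enumerate(sorted(k))}
--     keys = [(i, v) for i, v in enumerate([d[c] for c in k])]
--     keys.sort(key=lambda x: x[1])
--     words = [msg[i:n + i] for i in range(0, len(msg), n)]
--     w = list(itertools.zip_longest(*words, fillvalue=" "))
--     res = list(zip(*[w[i[0]] for i in keys[:len(w)]]))
--     return "".join("".join(r) for r in res)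
-- ===== SOURCE B (Python) =====
-- def nico(k, msg):
--     n = len(k)
--     order = sorted(range(n), key=lambda i: k[i])
--     total = max(1, -(-len(msg) // n)) * n
--     msg = msg.ljust(total)
--     return "".join(msg[i + j] for i in range(0, total, n) for j in order)
-- ===== Notes on version B (the rewrite author's own statement) =====
-- stated objective: faster
-- what changed: B computes the stable column permutation once as argsort(range(n), key=k[i]) instead of A's rank dictionary over sorted(k), and emits the result row by row from the padded message by direct indexing, replacing A's build-chunks / zip_longest-transpose / select-columns / re-transpose pipeline.
import Mathlib
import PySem

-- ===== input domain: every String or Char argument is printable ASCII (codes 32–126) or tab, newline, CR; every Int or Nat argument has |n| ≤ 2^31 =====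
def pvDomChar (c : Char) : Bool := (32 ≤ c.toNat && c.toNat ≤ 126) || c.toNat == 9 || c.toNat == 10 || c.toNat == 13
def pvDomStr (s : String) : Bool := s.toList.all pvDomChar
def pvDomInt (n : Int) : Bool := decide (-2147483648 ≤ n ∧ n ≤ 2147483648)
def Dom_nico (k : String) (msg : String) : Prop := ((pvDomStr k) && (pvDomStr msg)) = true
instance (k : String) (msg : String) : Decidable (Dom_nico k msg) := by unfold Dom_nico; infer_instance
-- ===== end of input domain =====

-- B replaces A's rank-dictionary + zip_longest column transposition by a single stable argsort of
-- the key and direct row-by-row indexed emission from the padded message (objective: simpler).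

-- ===== PORT A =====
-- itertools.zip_longest(*words, fillvalue=" "): row j (for j below the longest word length)
-- collects the j-th element of every word, ' ' when a word is too short (hand port, exact).
def pvMaxLen (ws : List (List Char)) : Nat := ws.foldl (fun a w => max a w.length) 0
def pvZipLongest (ws : List (List Char)) : List (List Char) :=
  (List.range (pvMaxLen ws)).map (fun j => ws.map (fun w => w.getD j ' '))
-- zip(*rows): row j for j below the shortest row length (hand port, exact; the default of
-- getD is never read because j stays below every row's length).
def pvMinLen (ws : List (List Char)) : Nat :=
  match ws with
  | [] => 0
  | w :: t => t.foldl (fun a w => min a w.length) w.length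
def pvZip (ws : List (List Char)) : List (List Char) :=
  (List.range (pvMinLen ws)).map (fun j => ws.map (fun w => w.getD j ' '))

def nico (k : String) (msg : String) : String :=
  let kl := k.toList
  let n := kl.length
  let m1 : List Char := msg.toList ++ List.replicate (n - msg.toList.length) ' '
  let d : PySem.Dict Char Int :=
    (PySem.List.enumerate (PySem.List.sorted kl (fun c => c)) 0).foldl
      (fun d p => d.insert p.2 p.1) (PySem.Dict.mk [])
  -- d[c]: KeyError is impossible (every character of k is a key of d), so .getD 0 never defaults
  let keys0 : List (Int × Int) := PySem.List.enumerate (kl.map (fun c => (d.get? c).getD 0)) 0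
  let keys := PySem.List.sorted keys0 (fun p => p.2)
  let words : List (List Char) :=
    (PySem.List.pyRange 0 (m1.length : Int) (n : Int)).map
      (fun i => PySem.List.slice m1 (some i) (some ((n : Int) + i)))
  let w := pvZipLongest words
  -- w[i[0]]: IndexError is impossible (i[0] < n = len(w)), so the [] default never fires
  let rows := (PySem.List.slice keys none (some (w.length : Int))).map
      (fun p => PySem.List.pyGetD w p.1 [])
  let res := pvZip rows
  String.ofList res.flatten

-- ===== PORT B =====
def nico_alt (k : String) (msg : String) : String :=
  let kl := k.toList
  let n := kl.length
  -- sorted(range(n), key=lambda i: k[i]); k[i] never raises for i in range(n)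
  let order := PySem.List.sorted (PySem.List.pyRange 0 (n : Int) 1)
      (fun i => PySem.List.pyGetD kl i ' ')
  let total : Int := max 1 (-(PySem.Int.floordiv (-(msg.toList.length : Int)) (n : Int))) * n
  let m := msg.toList ++ List.replicate (total.toNat - msg.toList.length) ' '  -- msg.ljust(total)
  String.ofList
    (((PySem.List.pyRange 0 total (n : Int)).map
        (fun i => order.map (fun j => PySem.List.pyGetD m (i + j) ' '))).flatten)

-- ===== PRECONDITION & SPEC =====
-- Pre_ excludes only the empty key, on which A raises ValueError (range() with step 0).
def Pre_nico (k : String) (msg : String) : Prop := k ≠ ""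
instance (k : String) (msg : String) : Decidable (Pre_nico k msg) := by unfold Pre_nico; infer_instance
def pvWitness_nico : String × String := ("cba", "hello world")
def Spec_nico (k : String) (msg : String) (out : String) : Prop := out = nico_alt k msg
instance (k : String) (msg : String) (out : String) : Decidable (Spec_nico k msg out) := by unfold Spec_nico; infer_instance

-- ===== CLAIM (what is proved, stated in full; the proofs are below) =====
def Claim_equal_nico : Prop := ∀ (k : String) (msg : String), Dom_nico k msg → Pre_nico k msg → Spec_nico k msg (nico k msg)

-- ===== LEMMAS AND PROOFS =====


theorem pv_insertBy_congr {α : Type} (p q : α → α → Bool) (x : α) (ys : List α)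
    (h : ∀ y ∈ ys, p x y = q x y) :
    PySem.List.insertBy p x ys = PySem.List.insertBy q x ys := by
  induction ys with
  | nil => rfl
  | cons y ys ih =>
    have hy : p x y = q x y := h y (by simp)
    simp only [PySem.List.insertBy, hy]
    split
    · rfl
    · rw [ih (fun z hz => h z (by simp [hz]))]

theorem pv_foldl_insertBy_congr {α : Type} (p q : α → α → Bool) :
    ∀ (xs acc : List α), (∀ x y, (x ∈ xs ∨ x ∈ acc) → (y ∈ xs ∨ y ∈ acc) → p x y = q x y) →
    xs.foldl (fun acc x => PySem.List.insertBy p x acc) acc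
      = xs.foldl (fun acc x => PySem.List.insertBy q x acc) acc
  | [], acc, _ => rfl
  | x :: xs, acc, h => by
    simp only [List.foldl_cons]
    rw [pv_insertBy_congr p q x acc (fun y hy => h x y (Or.inl (by simp)) (Or.inr hy))]
    apply pv_foldl_insertBy_congr
    intro a b ha hb
    apply h <;>
    · first
      | (rcases ha with ha | ha
         · exact Or.inl (by simp [ha])
         · rcases (PySem.List.mem_insertBy _ _ _ _).1 ha with h' | h'
           · exact Or.inl (by simp [h'])
           · exact Or.inr h')
      | (rcases hb with hb | hb
         · exact Or.inl (by simp [hb])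
         · rcases (PySem.List.mem_insertBy _ _ _ _).1 hb with h' | h'
           · exact Or.inl (by simp [h'])
           · exact Or.inr h')

theorem pv_sorted_congr {α κ1 κ2 : Type} [LinearOrder κ1] [LinearOrder κ2]
    (xs : List α) (f : α → κ1) (g : α → κ2)
    (h : ∀ x ∈ xs, ∀ y ∈ xs, (f x < f y ↔ g x < g y)) :
    PySem.List.sorted xs f = PySem.List.sorted xs g := by
  rw [PySem.List.sorted_eq_foldl_insertBy, PySem.List.sorted_eq_foldl_insertBy]
  apply pv_foldl_insertBy_congr
  intro a b ha hb
  simp only [List.mem_nil_iff, or_false] at ha hb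
  exact decide_eq_decide.2 (h a ha b hb)

theorem pv_insertBy_map {α β : Type} (p : β → β → Bool) (f : α → β) (x : α) (ys : List α) :
    PySem.List.insertBy p (f x) (ys.map f)
      = (PySem.List.insertBy (fun a b => p (f a) (f b)) x ys).map f := by
  induction ys with
  | nil => rfl
  | cons y ys ih =>
    simp only [List.map_cons, PySem.List.insertBy]
    split
    · simp
    · simp [ih]

theorem pv_foldl_insertBy_map {α β κ : Type} [LinearOrder κ] (key : β → κ) (f : α → β) :
    ∀ (xs : List α) (acc : List α),
    (xs.map f).foldl (fun acc b => PySem.List.insertBy (fun a b => decide (key a < key b)) b acc) (acc.map f)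
      = (xs.foldl (fun acc x => PySem.List.insertBy (fun a b => decide (key (f a) < key (f b))) x acc) acc).map f
  | [], acc => rfl
  | x :: xs, acc => by
    simp only [List.map_cons, List.foldl_cons]
    rw [pv_insertBy_map, pv_foldl_insertBy_map key f xs]

theorem pv_sorted_map {α β κ : Type} [LinearOrder κ] (xs : List α) (f : α → β) (key : β → κ) :
    PySem.List.sorted (xs.map f) key = (PySem.List.sorted xs (fun a => key (f a))).map f := by
  rw [PySem.List.sorted_eq_foldl_insertBy, PySem.List.sorted_eq_foldl_insertBy]
  have := pv_foldl_insertBy_map key f xs []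
  simpa using this

theorem pv_enumerate_map {α β : Type} (xs : List α) (f : α → β) (s : Int) :
    PySem.List.enumerate (xs.map f) s = (PySem.List.enumerate xs s).map (fun p => (p.1, f p.2)) := by
  induction xs generalizing s with
  | nil => rfl
  | cons x xs ih => simp [PySem.List.enumerate_cons, ih]

theorem pv_mem_enumerate_aux {α : Type} (d : α) :
    ∀ (xs : List α) (s : Int) (p : Int × α), p ∈ PySem.List.enumerate xs s →
      ∃ i : Nat, i < xs.length ∧ p.1 = s + i ∧ xs.getD i d = p.2
  | [], s, p, h => by simp [PySem.List.enumerate_nil] at h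
  | x :: xs, s, p, h => by
    rw [PySem.List.enumerate_cons] at h
    rcases List.mem_cons.1 h with h | h
    · exact ⟨0, by simp, by simp [h], by simp [h]⟩
    · obtain ⟨i, hi, hp1, hp2⟩ := pv_mem_enumerate_aux d xs (s + 1) p h
      exact ⟨i + 1, by simpa using hi, by omega, by simpa using hp2⟩

theorem pv_get?_fold_insert (ps : List (Int × Char)) (d0 : PySem.Dict Char Int) (c : Char)
    (hc : c ∈ ps.map (·.2)) :
    ∃ p ∈ ps, p.2 = c ∧ (ps.foldl (fun d p => d.insert p.2 p.1) d0).get? c = some p.1 := by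
  induction ps using List.reverseRecOn generalizing d0 with
  | nil => simp at hc
  | append_singleton qs p ih =>
    rw [List.foldl_append]
    simp only [List.foldl_cons, List.foldl_nil]
    by_cases hcp : c = p.2
    · exact ⟨p, by simp, hcp.symm, by rw [hcp]; exact PySem.Dict.get?_insert_self _ _ _⟩
    · have hc' : c ∈ qs.map (·.2) := by
        simp only [List.map_append, List.mem_append] at hc
        rcases hc with h | h
        · exact h
        · simp at h; exact absurd h hcp
      obtain ⟨p', hp', hp'2, hg⟩ := ih d0 hc'
      exact ⟨p', by simp [hp'], hp'2,
        by rw [PySem.Dict.get?_insert_of_ne _ _ (by exact hcp)]; exact hg⟩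

def pvRank (kl : List Char) : Char → Int := fun c =>
  (((PySem.List.enumerate (PySem.List.sorted kl (fun c => c)) 0).foldl
      (fun d p => d.insert p.2 p.1) (PySem.Dict.mk [])).get? c).getD 0

def pvOrder (kl : List Char) : List Int :=
  PySem.List.sorted (PySem.List.pyRange 0 (kl.length : Int) 1) (fun i => PySem.List.pyGetD kl i ' ')

theorem pv_rank_spec (kl : List Char) (c : Char) (hc : c ∈ kl) :
    ∃ i : Nat, i < kl.length ∧ (PySem.List.sorted kl (fun c => c)).getD i ' ' = c ∧
      pvRank kl c = (i : Int) := by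
  have hcs : c ∈ (PySem.List.enumerate (PySem.List.sorted kl (fun c => c)) 0).map (·.2) := by
    rw [PySem.List.map_snd_enumerate]
    exact (PySem.List.mem_sorted _ _ _ _).2 hc
  obtain ⟨p, hp, hp2, hg⟩ := pv_get?_fold_insert _ (PySem.Dict.mk []) c hcs
  obtain ⟨i, hi, hp1, hpd⟩ := pv_mem_enumerate_aux ' ' _ 0 p hp
  refine ⟨i, by simpa [PySem.List.length_sorted] using hi, by rw [hpd, hp2], ?_⟩
  unfold pvRank
  rw [hg]
  simp [hp1]

theorem pv_rank_lt (kl : List Char) (c1 c2 : Char) (h1 : c1 ∈ kl) (h2 : c2 ∈ kl) :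
    pvRank kl c1 < pvRank kl c2 ↔ c1 < c2 := by
  obtain ⟨i1, hi1, he1, hr1⟩ := pv_rank_spec kl c1 h1
  obtain ⟨i2, hi2, he2, hr2⟩ := pv_rank_spec kl c2 h2
  have hlen : (PySem.List.sorted kl (fun c => c)).length = kl.length :=
    PySem.List.length_sorted _ _ _
  have hpw : (PySem.List.sorted kl (fun c => c)).Pairwise (fun a b => a ≤ b) :=
    PySem.List.sorted_pairwise kl (fun c => c)
  have hmono : ∀ a b : Nat, a < b → (hb : b < kl.length) →
      (PySem.List.sorted kl (fun c => c)).getD a ' ' ≤ (PySem.List.sorted kl (fun c => c)).getD b ' ' := by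
    intro a b hab hb
    have ha' : a < (PySem.List.sorted kl (fun c => c)).length := by omega
    have hb' : b < (PySem.List.sorted kl (fun c => c)).length := by omega
    rw [List.getD_eq_getElem _ _ ha', List.getD_eq_getElem _ _ hb']
    exact List.pairwise_iff_getElem.1 hpw a b ha' hb' hab
  constructor
  · intro hlt
    have hne : c1 ≠ c2 := by
      intro he; rw [he] at hlt; exact lt_irrefl _ hlt
    have : i1 < i2 := by
      rw [hr1, hr2] at hlt; exact_mod_cast hlt
    have := hmono i1 i2 this hi2
    rw [he1, he2] at this
    exact lt_of_le_of_ne this hne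
  · intro hlt
    rcases lt_trichotomy i1 i2 with h | h | h
    · rw [hr1, hr2]; exact_mod_cast h
    · exfalso; rw [h] at he1; rw [he1] at he2; exact absurd he2 (ne_of_lt hlt)
    · exfalso
      have := hmono i2 i1 h hi1
      rw [he1, he2] at this
      exact absurd hlt (not_lt.2 this)

theorem pv_keys_order (kl : List Char) :
    ((PySem.List.sorted (PySem.List.enumerate (kl.map (pvRank kl)) 0) (fun p => p.2)).map (·.1))
      = pvOrder kl := by
  rw [pv_enumerate_map]
  rw [pv_sorted_map (PySem.List.enumerate kl 0) (fun p => (p.1, pvRank kl p.2)) (fun p => p.2)]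
  rw [List.map_map]
  have h1 : ((fun p : Int × Int => p.1) ∘ (fun p : Int × Char => (p.1, pvRank kl p.2)))
      = (fun p : Int × Char => p.1) := rfl
  rw [h1]
  have hmem : ∀ p ∈ PySem.List.enumerate kl 0, 0 ≤ p.1 ∧ p.1.toNat < kl.length ∧
      PySem.List.pyGetD kl p.1 ' ' = p.2 ∧ p.2 ∈ kl := by
    intro p hp
    obtain ⟨i, hi, hp1, hp2⟩ := pv_mem_enumerate_aux ' ' kl 0 p hp
    have h0 : (0 : Int) + i = i := by omega
    rw [h0] at hp1
    have hget : kl.getD i ' ' = p.2 := hp2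
    rw [List.getD_eq_getElem _ _ hi] at hget
    refine ⟨by omega, by omega, ?_, ?_⟩
    · rw [PySem.List.pyGetD_of_nonneg _ _ (by omega)]
      rw [show p.1.toNat = i by omega]
      exact hp2
    · rw [← hget]; exact List.getElem_mem _
  have h2 : PySem.List.sorted (PySem.List.enumerate kl 0) (fun p => pvRank kl p.2)
      = PySem.List.sorted (PySem.List.enumerate kl 0) (fun p => PySem.List.pyGetD kl p.1 ' ') := by
    apply pv_sorted_congr
    intro x hx y hy
    obtain ⟨_, _, hgx, hmx⟩ := hmem x hx
    obtain ⟨_, _, hgy, hmy⟩ := hmem y hy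
    rw [hgx, hgy]
    exact pv_rank_lt kl x.2 y.2 hmx hmy
  rw [h2]
  have h3 : PySem.List.sorted ((PySem.List.enumerate kl 0).map (fun p => p.1))
        (fun i => PySem.List.pyGetD kl i ' ')
      = (PySem.List.sorted (PySem.List.enumerate kl 0)
          (fun p => PySem.List.pyGetD kl p.1 ' ')).map (fun p => p.1) :=
    pv_sorted_map _ _ _
  rw [← h3, PySem.List.map_fst_enumerate]
  unfold pvOrder
  norm_num

theorem pv_foldl_max_le (b : Nat) : ∀ (l : List (List Char)) (a : Nat), (∀ w ∈ l, w.length ≤ b) → a ≤ b →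
    l.foldl (fun a w => max a w.length) a ≤ b
  | [], a, _, ha => ha
  | w :: l, a, h, ha =>
    pv_foldl_max_le b l (max a w.length) (fun x hx => h x (by simp [hx]))
      (by simp [ha, h w (by simp)])

theorem pv_le_foldl_max : ∀ (l : List (List Char)) (a : Nat), a ≤ l.foldl (fun a w => max a w.length) a
  | [], _ => le_refl _
  | w :: l, a => le_trans (le_max_left a w.length) (pv_le_foldl_max l _)

theorem pv_mem_le_foldl_max : ∀ (l : List (List Char)) (a : Nat) (w : List Char), w ∈ l →
    w.length ≤ l.foldl (fun a w => max a w.length) a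
  | [], _, _, h => by simp at h
  | w' :: l, a, w, h => by
    rcases List.mem_cons.1 h with h | h
    · subst h
      exact le_trans (le_max_right a w.length) (pv_le_foldl_max l _)
    · exact pv_mem_le_foldl_max l _ w h

theorem pv_foldl_min_const (q : Nat) : ∀ (l : List (List Char)), (∀ w ∈ l, w.length = q) →
    l.foldl (fun a w => min a w.length) q = q
  | [], _ => rfl
  | w :: l, h => by
    simp only [List.foldl_cons, h w (by simp), min_self]
    exact pv_foldl_min_const q l (fun x hx => h x (by simp [hx]))

theorem pv_getD_take_drop {α : Type} (xs : List α) (a nn jt : Nat) (d : α) (h : jt < nn) :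
    (List.take nn (List.drop a xs)).getD jt d = xs.getD (a + jt) d := by
  by_cases hin : a + jt < xs.length
  · have h1 : jt < (List.take nn (List.drop a xs)).length := by
      simp [List.length_take, List.length_drop]; omega
    rw [List.getD_eq_getElem _ _ h1, List.getD_eq_getElem _ _ hin]
    simp
  · have h1 : (List.take nn (List.drop a xs)).length ≤ jt := by
      simp [List.length_take, List.length_drop]; omega
    rw [List.getD_eq_default _ _ h1, List.getD_eq_default _ _ (by omega)]

theorem pv_pyGetD_append_replicate {α : Type} (xs : List α) (t : Nat) (c : α) (i : Int) (hi : 0 ≤ i) :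
    PySem.List.pyGetD (xs ++ List.replicate t c) i c = PySem.List.pyGetD xs i c := by
  rw [PySem.List.pyGetD_of_nonneg _ _ hi, PySem.List.pyGetD_of_nonneg _ _ hi]
  set j := i.toNat
  rcases lt_or_ge j xs.length with h1 | h1
  · rw [List.getD_eq_getElem _ _ (by simp only [List.length_append]; omega),
        List.getD_eq_getElem _ _ h1]
    simp [h1]
  · rw [List.getD_eq_default _ _ h1]
    rcases lt_or_ge j (xs.length + t) with h2 | h2
    · rw [List.getD_eq_getElem _ _ (by
        simp only [List.length_append, List.length_replicate]; omega)]
      simp [List.getElem_append, Nat.not_lt.2 h1]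
    · rw [List.getD_eq_default _ _ (by
        simp only [List.length_append, List.length_replicate]; omega)]

theorem pv_mem_order (kl : List Char) (j : Int) (hj : j ∈ pvOrder kl) :
    0 ≤ j ∧ j < (kl.length : Int) := by
  unfold pvOrder at hj
  rw [PySem.List.mem_sorted] at hj
  exact PySem.List.mem_pyRange_one.1 hj

theorem pv_length_order (kl : List Char) : (pvOrder kl).length = kl.length := by
  unfold pvOrder
  rw [PySem.List.length_sorted, PySem.List.length_pyRange_one]
  omega

def pvCanon (kl mL : List Char) (q : Nat) : List Char :=
  ((List.range q).map (fun r : Nat =>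
    (pvOrder kl).map (fun j => PySem.List.pyGetD mL ((kl.length : Int) * (r : Int) + j) ' '))).flatten

set_option maxHeartbeats 2000000 in
theorem pv_nico_eq (k msg : String) (hk : 0 < k.toList.length) :
    nico k msg = String.ofList (pvCanon k.toList msg.toList
      ((max k.toList.length msg.toList.length + k.toList.length - 1) / k.toList.length)) := by
  simp only [nico]
  set kl := k.toList with hkl
  set mL := msg.toList with hmL
  set n := kl.length with hn
  set L := mL.length with hL
  set m1 : List Char := mL ++ List.replicate (n - L) ' ' with hm1
  set M := m1.length with hM
  set q := (max n L + n - 1) / n with hq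
  have hMval : M = max n L := by
    rw [hM, hm1]; simp [List.length_append, List.length_replicate]; omega
  have hq1 : 1 ≤ q := by
    rw [hq]
    rw [Nat.le_div_iff_mul_le hk]
    omega
  -- the chunk starts
  have hrange : PySem.List.pyRange 0 (M : Int) (n : Int)
      = (List.range q).map (fun r : Nat => ((n : Int) * (r : Int))) := by
    rw [PySem.List.pyRange_of_pos 0 (M : Int) (by exact_mod_cast hk)]
    have hMpos : (0 : Int) < (M : Int) := by
      have : 0 < M := by omega
      exact_mod_cast this
    rw [if_pos hMpos]
    have hcast : ((M : Int) - 0 + (n : Int) - 1) = ((M + n - 1 : Nat) : Int) := by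
      omega
    rw [hcast, ← Int.natCast_div, Int.toNat_natCast]
    have hqM : (M + n - 1) / n = q := by rw [hq, hMval]
    rw [hqM]
    apply List.map_congr_left
    intro r _
    ring
  have hwords : (PySem.List.pyRange 0 (M : Int) (n : Int)).map
        (fun i => PySem.List.slice m1 (some i) (some ((n : Int) + i)))
      = (List.range q).map (fun r => List.take n (List.drop (n * r) m1)) := by
    rw [hrange, List.map_map]
    apply List.map_congr_left
    intro r _
    simp only [Function.comp]
    have h1 : ((n : Int) * (r : Int)) = ((n * r : Nat) : Int) := by push_cast; ring
    have h2 : ((n : Int) + (n : Int) * (r : Int)) = ((n + n * r : Nat) : Int) := by push_cast; ring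
    rw [h2, h1, PySem.List.slice_toNat m1 (by positivity) (by positivity)]
    rw [Int.toNat_natCast, Int.toNat_natCast]
    congr 1
    omega
  set words := (PySem.List.pyRange 0 (M : Int) (n : Int)).map
        (fun i => PySem.List.slice m1 (some i) (some ((n : Int) + i))) with hwordsdef
  have hwords_len : words.length = q := by
    rw [hwords]; simp
  have hword_get : ∀ (r : Nat) (hr : r < q), words[r]'(by omega) = List.take n (List.drop (n * r) m1) := by
    intro r hr
    simp [hwords]
  have hword_le : ∀ w ∈ words, w.length ≤ n := by
    intro w hw
    rw [hwords] at hw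
    obtain ⟨r, _, rfl⟩ := List.mem_map.1 hw
    simp [List.length_take]
  have hword0_mem : List.take n (List.drop (n * 0) m1) ∈ words := by
    rw [hwords]
    exact List.mem_map.2 ⟨0, by simp [List.mem_range]; omega, rfl⟩
  have hword0_len : (List.take n (List.drop (n * 0) m1)).length = n := by
    simp [List.length_take]
    omega
  have hmax : pvMaxLen words = n := by
    apply le_antisymm
    · exact pv_foldl_max_le n words 0 hword_le (by omega)
    · rw [← hword0_len]
      exact pv_mem_le_foldl_max words 0 _ hword0_mem
  have hzl : pvZipLongest words
      = (List.range n).map (fun j => words.map (fun wd => wd.getD j ' ')) := by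
    unfold pvZipLongest
    rw [hmax]
  set w := pvZipLongest words with hwdef
  have hwlen : w.length = n := by rw [hzl]; simp
  -- keys
  set keys := PySem.List.sorted
      (PySem.List.enumerate (kl.map (fun c =>
        ((((PySem.List.enumerate (PySem.List.sorted kl (fun c => c)) 0).foldl
            (fun d p => d.insert p.2 p.1) (PySem.Dict.mk [])).get? c).getD 0))) 0)
      (fun p => p.2) with hkeysdef
  have hrankfun : (fun c : Char =>
        ((((PySem.List.enumerate (PySem.List.sorted kl (fun c => c)) 0).foldl
            (fun d p => d.insert p.2 p.1) (PySem.Dict.mk [])).get? c).getD 0)) = pvRank kl := rfl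
  have hkeys_fst : keys.map (fun p => p.1) = pvOrder kl := by
    rw [hkeysdef, hrankfun]
    exact pv_keys_order kl
  have hkeys_len : keys.length = n := by
    rw [hkeysdef]
    rw [PySem.List.length_sorted, PySem.List.length_enumerate, List.length_map]
  have hslice : PySem.List.slice keys none (some ((w.length : Nat) : Int)) = keys := by
    rw [PySem.List.slice_to keys (by positivity), Int.toNat_natCast, hwlen, ← hkeys_len]
    exact List.take_length
  rw [hslice]
  have hrows : keys.map (fun p => PySem.List.pyGetD w p.1 [])
      = (pvOrder kl).map (fun j => words.map (fun wd => wd.getD j.toNat ' ')) := by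
    have h1 : keys.map (fun p => PySem.List.pyGetD w p.1 [])
        = (keys.map (fun p => p.1)).map (fun j => PySem.List.pyGetD w j []) := by
      rw [List.map_map]
      rfl
    rw [h1, hkeys_fst]
    apply List.map_congr_left
    intro j hj
    obtain ⟨hj0, hjn⟩ := pv_mem_order kl j hj
    have hjt : j.toNat < n := by omega
    rw [PySem.List.pyGetD_eq_getElem w [] hj0 (by rw [hwlen]; exact_mod_cast hjn)]
    simp [hzl]
  rw [hrows]
  set rows := (pvOrder kl).map (fun j => words.map (fun wd => wd.getD j.toNat ' ')) with hrowsdef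
  have hrows_len : ∀ row ∈ rows, row.length = q := by
    intro row hrow
    rw [hrowsdef] at hrow
    obtain ⟨j, _, rfl⟩ := List.mem_map.1 hrow
    simp [hwords_len]
  have hmin : pvMinLen rows = q := by
    have hrlen : rows.length = n := by rw [hrowsdef, List.length_map, pv_length_order]
    cases hrows2 : rows with
    | nil => rw [hrows2] at hrlen; simp at hrlen; omega
    | cons r0 t =>
      have hr0 : r0.length = q := hrows_len r0 (by rw [hrows2]; simp)
      show t.foldl (fun a w => min a w.length) r0.length = q
      rw [hr0]
      exact pv_foldl_min_const q t (fun x hx => hrows_len x (by rw [hrows2]; simp [hx]))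
  -- final
  unfold pvZip
  rw [hmin]
  unfold pvCanon
  congr 1
  congr 1
  apply List.map_congr_left
  intro r hr
  have hrq : r < q := List.mem_range.1 hr
  rw [hrowsdef, List.map_map]
  apply List.map_congr_left
  intro j hj
  obtain ⟨hj0, hjn⟩ := pv_mem_order kl j hj
  have hjt : j.toNat < n := by omega
  simp only [Function.comp]
  have hgr : (words.map (fun wd => wd.getD j.toNat ' ')).getD r ' '
      = (words[r]'(by omega)).getD j.toNat ' ' := by
    rw [List.getD_eq_getElem _ _ (by simp [hwords_len]; omega)]
    simp
  rw [hgr, hword_get r hrq, pv_getD_take_drop m1 (n * r) n j.toNat ' ' hjt]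
  have hcast : ((n * r + j.toNat : Nat) : Int) = (n : Int) * r + j := by
    push_cast
    rw [Int.toNat_of_nonneg hj0]
  have e1 : m1.getD (n * r + j.toNat) ' ' = PySem.List.pyGetD m1 ((n * r + j.toNat : Nat) : Int) ' ' := by
    rw [PySem.List.pyGetD_of_nonneg _ _ (by positivity), Int.toNat_natCast]
  rw [e1, hcast, hm1]
  exact pv_pyGetD_append_replicate mL (n - L) ' ' _ (by positivity)

theorem pv_q_eq (nn LL : Nat) (hn : 0 < nn) :
    (max nn LL + nn - 1) / nn = max 1 ((LL + nn - 1) / nn) := by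
  rcases le_total LL nn with h | h
  · have h1 : (max nn LL + nn - 1) / nn = 1 := by
      rw [max_eq_left h]
      exact Nat.div_eq_of_lt_le (by omega) (by omega)
    have h2 : (LL + nn - 1) / nn ≤ 1 := by
      by_contra hc
      rw [not_le] at hc
      have := (Nat.le_div_iff_mul_le hn).1 hc
      omega
    omega
  · have h1 : max nn LL = LL := max_eq_right h
    have h2 : 1 ≤ (LL + nn - 1) / nn := by
      rw [Nat.le_div_iff_mul_le hn]
      omega
    rw [h1]
    omega

set_option maxHeartbeats 2000000 in
theorem pv_nico_alt_eq (k msg : String) (hk : 0 < k.toList.length) :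
    nico_alt k msg = String.ofList (pvCanon k.toList msg.toList
      (max 1 ((msg.toList.length + k.toList.length - 1) / k.toList.length))) := by
  simp only [nico_alt]
  set kl := k.toList with hkl
  set mL := msg.toList with hmL
  set n := kl.length with hn
  set L := mL.length with hL
  set D := (L + n - 1) / n with hD
  set Q := max 1 D with hQ
  have hnz : (0 : Int) < (n : Int) := by exact_mod_cast hk
  have hceil : -(PySem.Int.floordiv (-(L : Int)) (n : Int)) = (D : Int) := by
    rw [PySem.Int.neg_floordiv_neg_eq_iff_of_pos hnz]
    have hd := Nat.div_add_mod (L + n - 1) n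
    set R := (L + n - 1) % n with hRdef
    have hR : R < n := Nat.mod_lt _ hk
    have hdz : (n : Int) * (D : Int) + (R : Int) = (L : Int) + (n : Int) - 1 := by
      have hP : ((n * D : Nat) : Int) = (n : Int) * (D : Int) := by push_cast; ring
      rw [← hP]
      generalize n * D = P at hd ⊢
      omega
    have hRz : (R : Int) < (n : Int) := by exact_mod_cast hR
    have hR0 : (0 : Int) ≤ (R : Int) := by positivity
    constructor
    · have e : ((D : Int) - 1) * (n : Int) = (n : Int) * (D : Int) - (n : Int) := by ring
      rw [e]
      linarith
    · have e2 : (D : Int) * (n : Int) = (n : Int) * (D : Int) := by ring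
      rw [e2]
      linarith
  have htot : max 1 (-(PySem.Int.floordiv (-(L : Int)) (n : Int))) * (n : Int)
      = ((Q * n : Nat) : Int) := by
    rw [hceil, hQ]
    push_cast
    ring
  rw [htot]
  have hQ1 : 1 ≤ Q := by omega
  have hrange : PySem.List.pyRange 0 ((Q * n : Nat) : Int) (n : Int)
      = (List.range Q).map (fun r : Nat => ((n : Int) * (r : Int))) := by
    rw [PySem.List.pyRange_of_pos 0 _ hnz]
    have hpos : (0 : Int) < ((Q * n : Nat) : Int) := by
      have : 0 < Q * n := by positivity
      exact_mod_cast this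
    rw [if_pos hpos]
    have hcast : (((Q * n : Nat) : Int) - 0 + (n : Int) - 1) = ((Q * n + n - 1 : Nat) : Int) := by
      push_cast; omega
    rw [hcast, ← Int.natCast_div, Int.toNat_natCast]
    have hcnt : (Q * n + n - 1) / n = Q := by
      have e1 : Q * n + n - 1 = (n - 1) + Q * n := by omega
      rw [e1, Nat.add_mul_div_right _ _ hk, Nat.div_eq_of_lt (by omega)]
      omega
    rw [hcnt]
    apply List.map_congr_left
    intro r _
    ring
  rw [hrange]
  have htotnat : (((Q * n : Nat) : Int)).toNat = Q * n := Int.toNat_natCast _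
  rw [htotnat]
  unfold pvCanon pvOrder
  congr 1
  congr 1
  rw [List.map_map]
  apply List.map_congr_left
  intro r hr
  simp only [Function.comp]
  apply List.map_congr_left
  intro j hj
  have hj0 : 0 ≤ j := by
    rw [PySem.List.mem_sorted] at hj
    exact (PySem.List.mem_pyRange_one.1 hj).1
  exact pv_pyGetD_append_replicate mL (Q * n - L) ' ' _ (by positivity)

-- ===== VERDICT (by name: the statement is the Claim_ definition above) =====
theorem nico_spec : Claim_equal_nico := by
  unfold Claim_equal_nico
  intro k msg _ hpre
  unfold Spec_nico
  have hk : 0 < k.toList.length := by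
    rcases Nat.eq_zero_or_pos k.toList.length with h | h
    · exact absurd (String.toList_inj.mp (by simp [List.eq_nil_of_length_eq_zero h])) hpre
    · exact h
  rw [pv_nico_eq k msg hk, pv_nico_alt_eq k msg hk,
    pv_q_eq k.toList.length msg.toList.length hk]
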